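-- pv_equiv track=rewrite | github.com/dafyddstephenson/ucla-roms | mpc/passes/f77_to_f95.py | _fix_integer
-- ===== SOURCE A (Python) =====
-- def _first_nonblank(text):
--     i = 0
--     while i < len(text) and text[i] in (" ", "\t"):
--         i += 1
--     return i
--
-- def _fix_integer(text):
--     """
--     INTEGER*X → INTEGER(kind=X)
--     default INTEGER → INTEGER(kind=4)
--     INTEGER(kind=...) left unchanged
--     """
--     l = len(text)
--     istr = _first_nonblank(text)
--     if istr + 6 >= l:
--         return text
--
--     if text[istr:istr+7].lower() != "integer":
--         return text
--
--     i = istr + 6   # index of 'R'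
--     j = i + 1
--
--     # skip blanks
--     while j < l and text[j] == " ":
--         j += 1
--
--     # INTEGER*X
--     if j < l and text[j] == "*":
--         k = j + 1
--         while k < l and text[k].isdigit():
--             k += 1
--         size = text[j+1:k]
--         if size:
--             return text[:i+1] + f"(kind={size})" + text[k:]
--         return text
--
--     # INTEGER(...)
--     if j < l and text[j] == "(":
--         return text  # already F90-ish
--
--     # default-size INTEGER
--     is_default = (j > i+1) or j >= l or text[j] in (" ", ",")
--     if is_default:
--         return text[:i+1] + "(kind=4)" + text[i+1:]
--
--     return text
-- ===== SOURCE B (Python) =====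
-- def _fix_integer(text):
--     """
--     INTEGER*X -> INTEGER(kind=X)
--     default INTEGER -> INTEGER(kind=4)
--     INTEGER(kind=...) left unchanged
--
--     Single forward pass as an explicit finite-state machine over
--     enumerate(text): phases lead -> kw -> gap, dispatching once the
--     character after the keyword (and its run of spaces) is seen.
--     """
--     phase, k, sp, head = "lead", 0, 0, 0
--     for idx, ch in enumerate(text):
--         if phase == "lead":
--             if ch in " \t":
--                 continue
--             phase = "kw"
--         if phase == "kw":
--             if ch.lower() != "integer"[k]:
--                 return text
--             k += 1
--             if k == 7:
--                 phase = "gap"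
--                 head = idx + 1      # position just after the 'R'
--             continue
--         # phase == "gap"
--         if ch == " ":
--             sp += 1
--             continue
--         if ch == "*":
--             digits = ""
--             for c2 in text[idx + 1:]:
--                 if not c2.isdigit():
--                     break
--                 digits += c2
--             if digits:
--                 return text[:head] + "(kind=" + digits + ")" + text[idx + 1 + len(digits):]
--             return text
--         if ch == "(":
--             return text  # already F90-ish
--         if sp > 0 or ch == ",":
--             return text[:head] + "(kind=4)" + text[head:]
--         return text
--     if phase == "gap":
--         return text[:head] + "(kind=4)" + text[head:]
--     return text
-- ===== Notes on version B (the rewrite author's own statement) =====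
-- stated objective: alternative
-- what changed: Replaces A's staged scans (find first nonblank index, compare a 7-char slice, then separate index-arithmetic while loops for spaces and digits) with a single forward pass over enumerate(text) driven by an explicit finite-state machine (lead/kw/gap phases) that matches the keyword character by character and dispatches once on the first character after the space run.
import Mathlib
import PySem

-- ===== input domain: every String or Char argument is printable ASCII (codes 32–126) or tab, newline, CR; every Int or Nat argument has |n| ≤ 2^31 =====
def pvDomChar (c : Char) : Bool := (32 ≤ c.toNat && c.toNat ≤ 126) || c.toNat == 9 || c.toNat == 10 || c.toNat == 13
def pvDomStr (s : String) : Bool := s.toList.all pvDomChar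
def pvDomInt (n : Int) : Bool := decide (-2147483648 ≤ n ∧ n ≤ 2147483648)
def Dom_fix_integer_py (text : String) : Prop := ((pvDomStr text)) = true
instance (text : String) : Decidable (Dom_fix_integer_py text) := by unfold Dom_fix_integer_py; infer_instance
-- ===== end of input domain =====

-- B replaces A's staged index scans (find start, compare a 7-char slice, three
-- separate while-loops with index arithmetic) by a single forward pass over the
-- string as an explicit finite-state machine (objective: alternative; same O(n)).

-- ===== PORT A =====
-- the three while-loops of A, all of shape `while i < len(text) and p(text[i]): i += 1`
def pvScanA (p : Char → Bool) (cs : List Char) (i : Nat) : Nat :=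
  if h : i < cs.length ∧ p cs[i]! then pvScanA p cs (i + 1) else i
  termination_by cs.length - i
  decreasing_by omega

-- literal port of _fix_integer; slices text[a:b] of in-range Nat bounds are take/drop (exact there)
def fix_integer_py (text : String) : String :=
  let cs := text.toList
  let l := cs.length
  -- _first_nonblank: while i < len and text[i] in (" ", "\t")
  let istr := pvScanA (fun c => c == ' ' || c == '\t') cs 0
  if istr + 6 ≥ l then text
  else if PySem.Chars.lower ((cs.drop istr).take 7) ≠ "integer".toList then text
  else
    let i := istr + 6
    -- while j < l and text[j] == " "
    let j := pvScanA (fun c => c == ' ') cs (i + 1)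
    if j < l ∧ cs[j]! = '*' then
      -- while k < l and text[k].isdigit()
      let k := pvScanA PySem.Chars.isdigit cs (j + 1)
      let size := (cs.drop (j + 1)).take (k - (j + 1))
      if size ≠ [] then
        String.ofList (cs.take (i + 1) ++ "(kind=".toList ++ size ++ ")".toList ++ cs.drop k)
      else text
    else if j < l ∧ cs[j]! = '(' then text
    else if j > i + 1 ∨ j ≥ l ∨ cs[j]! = ' ' ∨ cs[j]! = ',' then
      String.ofList (cs.take (i + 1) ++ "(kind=4)".toList ++ cs.drop (i + 1))
    else text

-- ===== PORT B =====
-- Source B's inner `for c2 in text[idx+1:]` loop collecting consecutive digits, break on non-digit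
def pvDigitsB : List Char → List Char
  | [] => []
  | c :: rest => if PySem.Chars.isdigit c then c :: pvDigitsB rest else []

-- Source B's "gap" phase: cs is the unread suffix, idx its start index, head = position after 'R'
def pvGapB (text : String) (cs : List Char) (idx head sp : Nat) : String :=
  match cs with
  | [] => String.ofList (text.toList.take head ++ "(kind=4)".toList ++ text.toList.drop head)
  | ch :: rest =>
    if ch == ' ' then pvGapB text rest (idx + 1) head (sp + 1)
    else if ch == '*' then
      let digits := pvDigitsB rest
      if digits ≠ [] then
        String.ofList (text.toList.take head ++ "(kind=".toList ++ digits ++ ")".toList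
          ++ text.toList.drop (idx + 1 + digits.length))
      else text
    else if ch == '(' then text
    else if sp > 0 ∨ ch = ',' then
      String.ofList (text.toList.take head ++ "(kind=4)".toList ++ text.toList.drop head)
    else text

-- Source B's "kw" phase: k chars of "integer" already matched
def pvKwB (text : String) (cs : List Char) (idx k : Nat) : String :=
  match cs with
  | [] => text
  | ch :: rest =>
    if PySem.Chars.lowerChar ch ≠ "integer".toList[k]! then text
    else if k + 1 = 7 then pvGapB text rest (idx + 1) (idx + 1) 0
    else pvKwB text rest (idx + 1) (k + 1)

-- Source B's "lead" phase (falls through to "kw" on the first non-blank, same char)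
def pvLeadB (text : String) (cs : List Char) (idx : Nat) : String :=
  match cs with
  | [] => text
  | ch :: rest =>
    if ch == ' ' || ch == '\t' then pvLeadB text rest (idx + 1)
    else pvKwB text (ch :: rest) idx 0

def fix_integer_py_alt (text : String) : String := pvLeadB text text.toList 0

-- ===== PRECONDITION & SPEC =====
def Spec_fix_integer_py (text : String) (out : String) : Prop := out = fix_integer_py_alt text
instance (text : String) (out : String) : Decidable (Spec_fix_integer_py text out) := by unfold Spec_fix_integer_py; infer_instance

-- ===== CLAIM (what is proved, stated in full; the proofs are below) =====
def Claim_equal_fix_integer_py : Prop := ∀ (text : String), Dom_fix_integer_py text → Spec_fix_integer_py text (fix_integer_py text)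

-- ===== LEMMAS AND PROOFS =====

-- A's while-loop scans land where takeWhile on the suffix ends
theorem pvScanA_eq (p : Char → Bool) (cs : List Char) (i : Nat) :
    pvScanA p cs i = i + ((cs.drop i).takeWhile p).length := by
  fun_induction pvScanA p cs i with
  | case1 i h ih =>
      rw [ih, List.drop_eq_getElem_cons h.1,
        List.takeWhile_cons_of_pos (by rw [← getElem!_pos cs i h.1]; exact h.2)]
      simp; omega
  | case2 i h =>
      by_cases hl : i < cs.length
      · have hp : p cs[i]! = false := by
          rcases Bool.eq_false_or_eq_true (p cs[i]!) with h' | h'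
          · exact absurd ⟨hl, h'⟩ h
          · exact h'
        rw [List.drop_eq_getElem_cons hl,
          List.takeWhile_cons_of_neg (by
            rw [← getElem!_pos cs i hl]
            intro hq; rw [hq] at hp; simp at hp)]
        simp
      · rw [List.drop_eq_nil_of_le (by omega)]; simp

-- dropWhile is drop of the takeWhile length
theorem pv_dropWhile_eq_drop (p : Char → Bool) (l : List Char) :
    l.dropWhile p = l.drop (l.takeWhile p).length := by
  induction l with
  | nil => rfl
  | cons c t ih => by_cases h : p c <;> simp [h, ih]

-- take of the takeWhile length is takeWhile
theorem pv_take_takeWhile (p : Char → Bool) (l : List Char) :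
    l.take (l.takeWhile p).length = l.takeWhile p :=
  (List.prefix_iff_eq_take.mp (List.takeWhile_prefix p)).symm

theorem pv_head_dropWhile (p : Char → Bool) (l t : List Char) (c : Char)
    (h : l.dropWhile p = c :: t) : p c = false := by
  have := List.head_dropWhile_not p (l := l) (w := by simp [h])
  simpa [h] using this

theorem pv_getElem_bang (l : List Char) (j : Nat) (c : Char) (t : List Char)
    (hj : j < l.length) (h : l.drop j = c :: t) : l[j]! = c := by
  rw [getElem!_pos l j hj]
  have h0 : (l.drop j)[0]'(by simp [h]) = c := by simp [h]
  rw [List.getElem_drop] at h0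
  simpa using h0

-- Source B's digit-collecting inner loop is takeWhile isdigit
theorem pvDigitsB_eq (cs : List Char) : pvDigitsB cs = cs.takeWhile PySem.Chars.isdigit := by
  induction cs with
  | nil => rfl
  | cons c t ih => by_cases h : PySem.Chars.isdigit c <;> simp [pvDigitsB, h, ih]

theorem pvGapB_nil (text : String) (idx head sp : Nat) :
    pvGapB text [] idx head sp =
      String.ofList (text.toList.take head ++ "(kind=4)".toList ++ text.toList.drop head) := rfl

theorem pvGapB_cons (text : String) (c : Char) (t : List Char) (idx head sp : Nat) :
    pvGapB text (c :: t) idx head sp =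
      if c == ' ' then pvGapB text t (idx + 1) head (sp + 1)
      else if c == '*' then
        (if pvDigitsB t ≠ [] then
          String.ofList (text.toList.take head ++ "(kind=".toList ++ pvDigitsB t
            ++ ")".toList ++ text.toList.drop (idx + 1 + (pvDigitsB t).length))
         else text)
      else if c == '(' then text
      else if sp > 0 ∨ c = ',' then
        String.ofList (text.toList.take head ++ "(kind=4)".toList ++ text.toList.drop head)
      else text := rfl

-- the gap phase first consumes the run of spaces, bumping idx and sp
theorem pvGapB_skip (text : String) (cs : List Char) (idx head sp : Nat) :
    pvGapB text cs idx head sp =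
      pvGapB text (cs.dropWhile (fun c => c == ' '))
        (idx + (cs.takeWhile (fun c => c == ' ')).length) head
        (sp + (cs.takeWhile (fun c => c == ' ')).length) := by
  induction cs generalizing idx sp with
  | nil => simp
  | cons c t ih =>
      by_cases h : c = ' '
      · subst h
        rw [show pvGapB text (' ' :: t) idx head sp = pvGapB text t (idx + 1) head (sp + 1) by
          simp [pvGapB]]
        rw [ih]
        simp
        have e1 : idx + 1 + (List.takeWhile (fun c => c == ' ') t).length
            = idx + ((List.takeWhile (fun c => c == ' ') t).length + 1) := by omega
        have e2 : sp + 1 + (List.takeWhile (fun c => c == ' ') t).length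
            = sp + ((List.takeWhile (fun c => c == ' ') t).length + 1) := by omega
        rw [e1, e2]
      · have hb : (c == ' ') = false := by simp [h]
        simp [hb]

-- the kw phase matches the remaining 7-k chars of "integer" case-insensitively,
-- then hands over to the gap phase; any mismatch or shortfall returns text
theorem pvKwB_eq (text : String) (cs : List Char) (idx k : Nat) (hk : k < 7) :
    pvKwB text cs idx k =
      if 7 - k ≤ cs.length ∧ PySem.Chars.lower (cs.take (7 - k)) = "integer".toList.drop k
      then pvGapB text (cs.drop (7 - k)) (idx + (7 - k)) (idx + (7 - k)) 0
      else text := by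
  induction cs generalizing idx k with
  | nil =>
      rw [if_neg (by simp; omega)]
      rfl
  | cons ch rest ih =>
      have hkl : k < ("integer".toList).length := by simp; omega
      have hget : "integer".toList[k]! = "integer".toList[k]'hkl := getElem!_pos _ k hkl
      have hdropT : "integer".toList.drop k
          = "integer".toList[k]'hkl :: "integer".toList.drop (k + 1) :=
        List.drop_eq_getElem_cons hkl
      have h7k : 7 - k = (7 - (k + 1)) + 1 := by omega
      have htake : (ch :: rest).take (7 - k) = ch :: rest.take (7 - (k + 1)) := by
        rw [h7k, List.take_succ_cons]
      have hlow : PySem.Chars.lower ((ch :: rest).take (7 - k))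
          = PySem.Chars.lowerChar ch :: PySem.Chars.lower (rest.take (7 - (k + 1))) := by
        rw [htake]; rfl
      have hred : pvKwB text (ch :: rest) idx k =
          if PySem.Chars.lowerChar ch ≠ "integer".toList[k]! then text
          else if k + 1 = 7 then pvGapB text rest (idx + 1) (idx + 1) 0
          else pvKwB text rest (idx + 1) (k + 1) := rfl
      by_cases hc : PySem.Chars.lowerChar ch = "integer".toList[k]!
      · by_cases h7 : k + 1 = 7
        · have hk6 : k = 6 := by omega
          subst hk6
          rw [show pvKwB text (ch :: rest) idx 6 = pvGapB text rest (idx + 1) (idx + 1) 0 by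
            rw [hred, if_neg (fun hq => hq hc), if_pos rfl]]
          rw [if_pos ⟨by simp, by
            rw [hlow]
            have : PySem.Chars.lowerChar ch = 'r' := by rw [hc]; rfl
            simp [this]
            rfl⟩]
          simp
        · rw [show pvKwB text (ch :: rest) idx k = pvKwB text rest (idx + 1) (k + 1) by
            rw [hred, if_neg (fun hq => hq hc), if_neg h7]]
          rw [ih (idx + 1) (k + 1) (by omega)]
          have hcondiff :
              ((7 - (k + 1) ≤ rest.length ∧
                PySem.Chars.lower (rest.take (7 - (k + 1))) = "integer".toList.drop (k + 1)))
              ↔ (7 - k ≤ (ch :: rest).length ∧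
                PySem.Chars.lower ((ch :: rest).take (7 - k)) = "integer".toList.drop k) := by
            rw [hlow, hdropT]
            constructor
            · rintro ⟨h1, h2⟩
              exact ⟨by simp; omega, by rw [h2, ← hget, hc]⟩
            · rintro ⟨h1, h2⟩
              refine ⟨by simp at h1; omega, ?_⟩
              exact (List.cons.injEq _ _ _ _ ▸ h2).2
          by_cases hcond : 7 - (k + 1) ≤ rest.length ∧
              PySem.Chars.lower (rest.take (7 - (k + 1))) = "integer".toList.drop (k + 1)
          · rw [if_pos hcond, if_pos (hcondiff.mp hcond)]
            have hdrop : (ch :: rest).drop (7 - k) = rest.drop (7 - (k + 1)) := by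
              rw [h7k, List.drop_succ_cons]
            rw [hdrop]
            congr 1 <;> omega
          · rw [if_neg hcond, if_neg (fun h => hcond (hcondiff.mpr h))]
      · rw [show pvKwB text (ch :: rest) idx k = text by rw [hred, if_pos hc]]
        rw [if_neg]
        rintro ⟨h1, h2⟩
        rw [hlow, hdropT] at h2
        exact hc ((List.cons.injEq _ _ _ _ ▸ h2).1.trans hget.symm)

-- the lead phase consumes blanks then starts the kw phase at the first non-blank
theorem pvLeadB_eq (text : String) (cs : List Char) (idx : Nat) :
    pvLeadB text cs idx =
      pvKwB text (cs.dropWhile (fun c => c == ' ' || c == '\t'))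
        (idx + (cs.takeWhile (fun c => c == ' ' || c == '\t')).length) 0 := by
  induction cs generalizing idx with
  | nil => simp [pvLeadB, pvKwB]
  | cons c t ih =>
      by_cases h : (c == ' ' || c == '\t') = true
      · rw [show pvLeadB text (c :: t) idx = pvLeadB text t (idx + 1) by simp [pvLeadB, h]]
        rw [ih]
        simp [h]
        congr 1
        omega
      · rw [show pvLeadB text (c :: t) idx = pvKwB text (c :: t) idx 0 by simp [pvLeadB, h]]
        simp [h]

theorem fix_integer_py_eq (text : String) : fix_integer_py text = fix_integer_py_alt text := by
  unfold fix_integer_py fix_integer_py_alt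
  rw [pvLeadB_eq, pvKwB_eq text _ _ 0 (by omega)]
  simp only [pvScanA_eq, List.drop_zero, Nat.zero_add, Nat.sub_zero, List.drop_zero]
  set cs := text.toList with hcs
  set bl : Char → Bool := (fun c => c == ' ' || c == '\t') with hbl
  set sp : Char → Bool := (fun c => c == ' ') with hsp
  have hT : (cs.takeWhile bl).length ≤ cs.length := (List.takeWhile_prefix bl).length_le
  have hS : (cs.dropWhile bl).length = cs.length - (cs.takeWhile bl).length := by
    rw [pv_dropWhile_eq_drop]; simp
  set T0 := (cs.takeWhile bl).length with hT0
  set S : List Char := cs.dropWhile bl with hSdef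
  have hSdrop : S = cs.drop T0 := by rw [hSdef, hT0, pv_dropWhile_eq_drop]
  by_cases h1 : S.length < 7
  · rw [if_pos (show T0 + 6 ≥ cs.length by omega),
        if_neg (show ¬(7 ≤ S.length ∧ PySem.Chars.lower (List.take 7 S) = "integer".toList) by
          rintro ⟨ha, _⟩; omega)]
  · by_cases h2 : PySem.Chars.lower (S.take 7) = "integer".toList
    · rw [if_neg (show ¬(T0 + 6 ≥ cs.length) by omega),
          if_neg (show ¬(PySem.Chars.lower (List.take 7 (List.drop T0 cs)) ≠ "integer".toList) by
            rw [← hSdrop]; simpa using h2),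
          if_pos (show 7 ≤ S.length ∧ PySem.Chars.lower (List.take 7 S) = "integer".toList from
            ⟨by omega, h2⟩)]
      -- both sides are now in the gap phase / A's post-keyword scan
      rw [pvGapB_skip]
      set rest : List Char := S.drop 7 with hrest
      have hrestcs : rest = cs.drop (T0 + 7) := by
        rw [hrest, hSdrop, List.drop_drop]
      have hRL : rest.length = S.length - 7 := by rw [hrest]; simp
      set tw := (rest.takeWhile sp).length with htwdef
      have htwle : tw ≤ rest.length := (List.takeWhile_prefix sp).length_le
      have hAj : cs.drop (T0 + 6 + 1) = rest := by rw [hrestcs]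
      rw [hAj]
      have hAfter : rest.dropWhile sp = rest.drop tw := pv_dropWhile_eq_drop sp rest
      have hDropJ : cs.drop (T0 + 7 + tw) = rest.drop tw := by
        rw [← List.drop_drop, hrestcs]
      rcases haft : rest.dropWhile sp with _ | ⟨c, t⟩
      · -- after the blanks nothing is left: A's is_default via j ≥ l, B's gap-phase nil
        have h0 : rest.length ≤ tw := by
          have := congrArg List.length haft
          rw [hAfter] at haft
          have := List.drop_eq_nil_iff.mp haft
          omega
        have hjge : ¬(T0 + 6 + 1 + tw < cs.length) := by omega
        rw [if_neg (fun hq => hjge hq.1), if_neg (fun hq => hjge hq.1),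
            if_pos (Or.inr (Or.inl (show T0 + 6 + 1 + tw ≥ cs.length by omega))),
            pvGapB_nil, ← hcs, hrestcs]
      · have haft' : rest.drop tw = c :: t := by rw [← hAfter, haft]
        have hlen_aft : rest.length - tw = t.length + 1 := by
          have := congrArg List.length haft'
          simp at this; omega
        have hjlt : T0 + 6 + 1 + tw < cs.length := by omega
        have hdj : cs.drop (T0 + 6 + 1 + tw) = c :: t := by
          rw [show T0 + 6 + 1 + tw = T0 + 7 + tw by omega, hDropJ, haft']
        have hgc : cs[T0 + 6 + 1 + tw]! = c := pv_getElem_bang cs _ c t hjlt hdj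
        have hspc : sp c = false := pv_head_dropWhile sp rest t c haft
        have hcsp : c ≠ ' ' := by intro h; rw [h] at hspc; simp [hsp] at hspc
        rw [pvGapB_cons, if_neg (show ¬((c == ' ') = true) by simp [hcsp]), ← hcs,
            ← htwdef]
        have h67 : T0 + 6 + 1 = T0 + 7 := by omega
        rw [h67]
        have hdj7 : cs.drop (T0 + 7 + tw) = c :: t := by rw [← h67]; exact hdj
        have hjlt7 : T0 + 7 + tw < cs.length := by omega
        have hgc7 : cs[T0 + 7 + tw]! = c := by rw [← h67]; exact hgc
        have hbody : cs.drop (T0 + 7 + tw + 1) = t := by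
          rw [← List.drop_drop, hdj7]; rfl
        rw [hbody, Nat.add_sub_cancel_left, pv_take_takeWhile, pvDigitsB_eq]
        by_cases hstar : c = '*'
        · rw [if_pos ⟨hjlt7, by rw [hgc7, hstar]⟩,
              if_pos (show (c == '*') = true by simp [hstar])]
        · rw [if_neg (fun hq => hstar (by rw [← hgc7]; exact hq.2)),
              if_neg (show ¬((c == '*') = true) by simp [hstar])]
          by_cases hpar : c = '('
          · rw [if_pos ⟨hjlt7, by rw [hgc7, hpar]⟩,
                if_pos (show (c == '(') = true by simp [hpar])]
          · rw [if_neg (fun hq => hpar (by rw [← hgc7]; exact hq.2)),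
                if_neg (show ¬((c == '(') = true) by simp [hpar])]
            by_cases hdef : 0 < tw ∨ c = ','
            · have hA3 : T0 + 7 + tw > T0 + 7 ∨ T0 + 7 + tw ≥ cs.length
                  ∨ cs[T0 + 7 + tw]! = ' ' ∨ cs[T0 + 7 + tw]! = ',' := by
                rcases hdef with h | h
                · exact Or.inl (by omega)
                · exact Or.inr (Or.inr (Or.inr (by rw [hgc7, h])))
              have hB3 : 0 + tw > 0 ∨ c = ',' := by
                rcases hdef with h | h
                · exact Or.inl (by omega)
                · exact Or.inr h
              rw [if_pos hA3, if_pos hB3, hrestcs]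
            · obtain ⟨htw0, hcomma⟩ := not_or.mp hdef
              have hA3n : ¬(T0 + 7 + tw > T0 + 7 ∨ T0 + 7 + tw ≥ cs.length
                  ∨ cs[T0 + 7 + tw]! = ' ' ∨ cs[T0 + 7 + tw]! = ',') := by
                rintro (h | h | h | h)
                · omega
                · omega
                · rw [hgc7] at h; exact hcsp h
                · rw [hgc7] at h; exact hcomma h
              have hB3n : ¬(0 + tw > 0 ∨ c = ',') := by
                rintro (h | h)
                · omega
                · exact hcomma h
              rw [if_neg hA3n, if_neg hB3n]
    · rw [if_neg (show ¬(T0 + 6 ≥ cs.length) by omega),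
          if_pos (show PySem.Chars.lower (List.take 7 (List.drop T0 cs)) ≠ "integer".toList by
            rw [← hSdrop]; simpa using h2),
          if_neg (show ¬(7 ≤ S.length ∧ PySem.Chars.lower (List.take 7 S) = "integer".toList) by
            rintro ⟨_, hb⟩; exact h2 hb)]

-- ===== VERDICT (by name: the statement is the Claim_ definition above) =====
theorem fix_integer_py_spec : Claim_equal_fix_integer_py := by
  intro text _
  exact fix_integer_py_eq text
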